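-- pv_equiv track=rewrite | github.com/HONGYANG-j/Intro-to-AI | Lab Report/graph_utils.py | full_bfs
-- ===== SOURCE A (Python) =====
-- from collections import deque
-- from typing import Dict, List, Tuple, Set
--
-- def full_bfs(graph: Dict[str, List[str]], start: str = 'A') -> Tuple[List[str], Dict[str, int]]:
--     visited, order, levels = set(), [], {}
--     all_nodes = sorted(graph.keys())
--
--     def bfs_from_root(root):
--         q = deque([(root, 0)])
--         visited.add(root)
--         levels[root] = 0
--         while q:
--             node, lvl = q.popleft()
--             order.append(node)
--             for nb in graph.get(node, []):
--                 if nb not in visited: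
--                     visited.add(nb)
--                     levels[nb] = lvl + 1
--                     q.append((nb, lvl + 1))
--
--     if start in all_nodes:
--         bfs_from_root(start)
--     for node in all_nodes:
--         if node not in visited:
--             bfs_from_root(node)
--     return order, levels
-- ===== SOURCE B (Python) =====
-- def full_bfs(graph, start='A'):
--     visited, order, levels = set(), [], {}
--     all_nodes = sorted(graph.keys())
--
--     def bfs_from_root(root):
--         visited.add(root)
--         levels[root] = 0
--         frontier, lvl = [root], 0
--         while frontier:
--             nxt = []
--             for node in frontier:
--                 order.append(node)
--                 for nb in graph.get(node, []):
--                     if nb not in visited: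
--                         visited.add(nb)
--                         levels[nb] = lvl + 1
--                         nxt.append(nb)
--             frontier, lvl = nxt, lvl + 1
--
--     if start in all_nodes:
--         bfs_from_root(start)
--     for node in all_nodes:
--         if node not in visited:
--             bfs_from_root(node)
--     return order, levels
-- ===== Notes on version B (the rewrite author's own statement) =====
-- stated objective: alternative
-- what changed: Replaces A's single FIFO deque of (node, level) tuples with a level-synchronous traversal: a frontier list per level and an explicit level counter, building the next frontier from unvisited neighbours (marked visited at enqueue time), with the same sorted-keys / start-first scaffold.
import Mathlib
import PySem

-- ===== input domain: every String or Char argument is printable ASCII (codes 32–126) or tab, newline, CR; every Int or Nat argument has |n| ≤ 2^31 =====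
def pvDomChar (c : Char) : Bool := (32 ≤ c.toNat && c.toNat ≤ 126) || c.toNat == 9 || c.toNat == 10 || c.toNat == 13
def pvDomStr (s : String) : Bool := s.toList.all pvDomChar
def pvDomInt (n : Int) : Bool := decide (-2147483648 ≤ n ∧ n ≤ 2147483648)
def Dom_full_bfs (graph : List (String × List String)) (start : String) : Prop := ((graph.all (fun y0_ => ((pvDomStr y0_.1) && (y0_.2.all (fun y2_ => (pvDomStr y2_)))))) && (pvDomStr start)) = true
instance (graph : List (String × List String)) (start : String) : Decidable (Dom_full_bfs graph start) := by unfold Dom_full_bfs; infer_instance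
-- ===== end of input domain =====

-- B replaces A's tuple-tagged FIFO queue by a level-synchronous frontier loop (same return value; alternative decomposition, no speed claim).

-- ===== shared helpers (used by both ports) =====
-- graph.get(node, []) on the association list (first match, Python dict semantics)
def pvLookup (graph : List (String × List String)) (node : String) : List String :=
  (PySem.Dict.mk graph).getD node []

-- number of neighbour occurrences in the graph that are not yet visited (termination measure only)
def pvUnvis (graph : List (String × List String)) (visited : List String) : Nat :=
  ((graph.flatMap Prod.snd).filter (fun c => !(visited.contains c))).length

-- ===== PORT A =====
-- one step of A's inner `for nb in graph.get(node, [])` loop: state (visited, levels, queue)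
def pvStepA (lvl : Int) (acc : List String × PySem.Dict String Int × List (String × Int))
    (nb : String) : List String × PySem.Dict String Int × List (String × Int) :=
  if acc.1.contains nb then acc
  else (PySem.Set.add acc.1 nb, acc.2.1.insert nb (lvl + 1), acc.2.2 ++ [(nb, lvl + 1)])

-- ===== B-side helpers (also cited by A's termination proof) =====
-- one step of B's inner neighbour loop: state (visited, levels, nxt)
def pvStepB (lvl : Int) (a : List String × PySem.Dict String Int × List String)
    (nb : String) : List String × PySem.Dict String Int × List String :=
  if a.1.contains nb then a
  else (PySem.Set.add a.1 nb, a.2.1.insert nb (lvl + 1), a.2.2 ++ [nb])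

-- B: visit one frontier node (its whole neighbour loop)
def pvVisitB (graph : List (String × List String)) (lvl : Int)
    (st : List String × PySem.Dict String Int × List String) (node : String) :
    List String × PySem.Dict String Int × List String :=
  (pvLookup graph node).foldl (pvStepB lvl) st

-- ===== termination lemmas (cited by the ports' decreasing_by) =====
lemma pv_filter_mono {l : List String} {p q : String → Bool} (h : ∀ x ∈ l, p x → q x) :
    (l.filter p).length ≤ (l.filter q).length := by
  induction l with
  | nil => simp
  | cons x xs ih =>
    have hx := h x (by simp)
    have ihx := ih (fun y hy => h y (by simp [hy]))
    by_cases hp : p x <;> by_cases hq : q x <;> simp [hp, hq] at * <;> omega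

lemma pv_unvis_lt (graph : List (String × List String)) (v : List String) (nb : String)
    (h1 : nb ∈ graph.flatMap Prod.snd) (h2 : nb ∉ v) :
    pvUnvis graph (PySem.Set.add v nb) + 1 ≤ pvUnvis graph v := by
  rw [PySem.Set.add_of_not_mem h2]
  unfold pvUnvis
  have key : ∀ L : List String, nb ∈ L →
      (L.filter (fun c => !(v ++ [nb]).contains c)).length + 1
        ≤ (L.filter (fun c => !v.contains c)).length := by
    intro L hL
    induction L with
    | nil => simp at hL
    | cons x xs ih =>
      have hmono : ∀ c ∈ xs, (!(v ++ [nb]).contains c) → (!v.contains c) := by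
        intro c _ hc
        simp only [Bool.not_eq_eq_eq_not, Bool.not_true] at *
        simp only [List.contains_append, Bool.or_eq_false_iff] at hc
        exact hc.1
      have hfm := pv_filter_mono hmono
      rcases List.mem_cons.mp hL with rfl | hx
      · simp only [List.filter_cons]
        rw [if_neg (by simp), if_pos (by simp [List.contains_eq_mem, h2])]
        simp only [List.length_cons]; omega
      · have ih' := ih hx
        by_cases hv : (v ++ [nb]).contains x = true
        · have hvm : x ∈ v ∨ x = nb := by
            have : x ∈ v ++ [nb] := by simpa [List.contains_eq_mem] using hv
            simpa using this
          by_cases hq : x ∈ v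
          · rw [List.filter_cons, List.filter_cons,
                if_neg (by simp; exact fun h => (h hq).elim),
                if_neg (by simp; exact hq)]
            omega
          · have hxe : x = nb := hvm.resolve_left hq
            rw [List.filter_cons, List.filter_cons,
                if_neg (by simp; exact fun _ => hxe),
                if_pos (by simp; exact hq)]
            simp only [List.length_cons]; omega
        · have hnm : x ∉ v ∧ ¬x = nb := by
            have : x ∉ v ++ [nb] := by
              simpa [List.contains_eq_mem] using Bool.eq_false_iff.mpr hv
            simpa using this
          rw [List.filter_cons, List.filter_cons,
              if_pos (by simp; exact hnm),
              if_pos (by simp; exact hnm.1)]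
          simp only [List.length_cons]; omega
  exact key _ h1

lemma pv_lookup_subset (graph : List (String × List String)) (node : String) :
    ∀ nb ∈ pvLookup graph node, nb ∈ graph.flatMap Prod.snd := by
  induction graph with
  | nil => simp [pvLookup, PySem.Dict.getD, PySem.Dict.get?]
  | cons p rest ih =>
    intro nb hnb
    simp only [pvLookup, PySem.Dict.getD, PySem.Dict.get?, List.find?_cons] at hnb ih
    by_cases hk : (p.1 == node) = true
    · simp only [hk, Option.map_some, Option.getD_some] at hnb
      exact List.mem_flatMap.mpr ⟨p, by simp, hnb⟩
    · have hk' : (p.1 == node) = false := Bool.eq_false_iff.mpr hk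
      simp only [hk'] at hnb
      simp only [List.flatMap_cons, List.mem_append]
      exact Or.inr (ih nb hnb)

lemma pvStepB_fold_bound (graph : List (String × List String)) (lvl : Int) :
    ∀ (nbs : List String), (∀ nb ∈ nbs, nb ∈ graph.flatMap Prod.snd) →
    ∀ (v : List String) (lv : PySem.Dict String Int) (a : List String),
    pvUnvis graph (nbs.foldl (pvStepB lvl) (v, lv, a)).1
      + (nbs.foldl (pvStepB lvl) (v, lv, a)).2.2.length
    ≤ pvUnvis graph v + a.length := by
  intro nbs
  induction nbs with
  | nil => intro _ v lv a; simp
  | cons nb rest ih =>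
    intro h v lv a
    simp only [List.foldl_cons]
    by_cases hc : v.contains nb = true
    · have h1 : pvStepB lvl (v, lv, a) nb = (v, lv, a) := by (simp [pvStepB]; simpa [List.contains_eq_mem] using hc)
      rw [h1]; exact ih (fun y hy => h y (by simp [hy])) v lv a
    · have hc' : v.contains nb = false := Bool.eq_false_iff.mpr hc
      have h1 : pvStepB lvl (v, lv, a) nb
          = (PySem.Set.add v nb, lv.insert nb (lvl + 1), a ++ [nb]) := by
        (simp [pvStepB]; simpa [List.contains_eq_mem] using hc')
      rw [h1]
      have ih' := ih (fun y hy => h y (by simp [hy]))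
        (PySem.Set.add v nb) (lv.insert nb (lvl + 1)) (a ++ [nb])
      have hlt := pv_unvis_lt graph v nb (h nb (by simp))
        (by simpa [List.contains_eq_mem] using hc')
      simp only [List.length_append, List.length_cons, List.length_nil] at *
      omega

lemma pvStepB_fold_append (lvl : Int) :
    ∀ (nbs : List String) (v : List String) (lv : PySem.Dict String Int) (a : List String),
    nbs.foldl (pvStepB lvl) (v, lv, a)
    = ((nbs.foldl (pvStepB lvl) (v, lv, [])).1,
       (nbs.foldl (pvStepB lvl) (v, lv, [])).2.1,
       a ++ (nbs.foldl (pvStepB lvl) (v, lv, [])).2.2) := by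
  intro nbs
  induction nbs with
  | nil => intro v lv a; simp
  | cons nb rest ih =>
    intro v lv a
    simp only [List.foldl_cons]
    by_cases hc : v.contains nb = true
    · have h1 : pvStepB lvl (v, lv, a) nb = (v, lv, a) := by (simp [pvStepB]; simpa [List.contains_eq_mem] using hc)
      have h2 : pvStepB lvl (v, lv, ([] : List String)) nb = (v, lv, ([] : List String)) := by
        (simp [pvStepB]; simpa [List.contains_eq_mem] using hc)
      rw [h1, h2]; exact ih v lv a
    · have hc' : v.contains nb = false := Bool.eq_false_iff.mpr hc
      have h1 : pvStepB lvl (v, lv, a) nb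
          = (PySem.Set.add v nb, lv.insert nb (lvl + 1), a ++ [nb]) := by (simp [pvStepB]; simpa [List.contains_eq_mem] using hc')
      have h2 : pvStepB lvl (v, lv, ([] : List String)) nb
          = (PySem.Set.add v nb, lv.insert nb (lvl + 1), [nb]) := by (simp [pvStepB]; simpa [List.contains_eq_mem] using hc')
      rw [h1, h2, ih _ _ (a ++ [nb]), ih _ _ [nb]]
      simp [List.append_assoc]

lemma pvStepA_fold_eq (lvl : Int) :
    ∀ (nbs : List String) (v : List String) (lv : PySem.Dict String Int) (q : List (String × Int)),
    nbs.foldl (pvStepA lvl) (v, lv, q)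
    = ((nbs.foldl (pvStepB lvl) (v, lv, [])).1,
       (nbs.foldl (pvStepB lvl) (v, lv, [])).2.1,
       q ++ (nbs.foldl (pvStepB lvl) (v, lv, [])).2.2.map (fun c => (c, lvl + 1))) := by
  intro nbs
  induction nbs with
  | nil => intro v lv q; simp
  | cons nb rest ih =>
    intro v lv q
    simp only [List.foldl_cons]
    by_cases hc : v.contains nb = true
    · have h1 : pvStepA lvl (v, lv, q) nb = (v, lv, q) := by (simp [pvStepA]; simpa [List.contains_eq_mem] using hc)
      have h2 : pvStepB lvl (v, lv, ([] : List String)) nb = (v, lv, ([] : List String)) := by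
        (simp [pvStepB]; simpa [List.contains_eq_mem] using hc)
      rw [h1, h2]; exact ih v lv q
    · have hc' : v.contains nb = false := Bool.eq_false_iff.mpr hc
      have h1 : pvStepA lvl (v, lv, q) nb
          = (PySem.Set.add v nb, lv.insert nb (lvl + 1), q ++ [(nb, lvl + 1)]) := by
        (simp [pvStepA]; simpa [List.contains_eq_mem] using hc')
      have h2 : pvStepB lvl (v, lv, ([] : List String)) nb
          = (PySem.Set.add v nb, lv.insert nb (lvl + 1), [nb]) := by (simp [pvStepB]; simpa [List.contains_eq_mem] using hc')
      rw [h1, h2, ih _ _ (q ++ [(nb, lvl + 1)]), pvStepB_fold_append lvl rest _ _ [nb]]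
      simp [List.append_assoc]

lemma pvBfsA_dec (graph : List (String × List String)) (node : String) (lvl : Int)
    (rest : List (String × Int)) (visited : List String) (levels : PySem.Dict String Int) :
    2 * pvUnvis graph ((pvLookup graph node).foldl (pvStepA lvl) (visited, levels, rest)).1
      + ((pvLookup graph node).foldl (pvStepA lvl) (visited, levels, rest)).2.2.length
    < 2 * pvUnvis graph visited + ((node, lvl) :: rest).length := by
  rw [pvStepA_fold_eq]
  dsimp only
  have hb := pvStepB_fold_bound graph lvl (pvLookup graph node)
    (pv_lookup_subset graph node) visited levels []
  simp only [List.length_append, List.length_map, List.length_cons, List.length_nil] at *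
  omega

lemma pvBfsB_fold_bound (graph : List (String × List String)) (lvl : Int) :
    ∀ (fr : List String) (acc : (List String × PySem.Dict String Int × List String) × List String),
    pvUnvis graph (fr.foldl (fun acc node => (pvVisitB graph lvl acc.1 node, acc.2 ++ [node])) acc).1.1
      + (fr.foldl (fun acc node => (pvVisitB graph lvl acc.1 node, acc.2 ++ [node])) acc).1.2.2.length
    ≤ pvUnvis graph acc.1.1 + acc.1.2.2.length := by
  intro fr
  induction fr with
  | nil => intro acc; simp
  | cons x t ih =>
    intro acc
    simp only [List.foldl_cons]
    have hstep := pvStepB_fold_bound graph lvl (pvLookup graph x)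
      (pv_lookup_subset graph x) acc.1.1 acc.1.2.1 acc.1.2.2
    have hstep' : pvUnvis graph (pvVisitB graph lvl acc.1 x).1
        + (pvVisitB graph lvl acc.1 x).2.2.length
        ≤ pvUnvis graph acc.1.1 + acc.1.2.2.length := hstep
    have ih' := ih (pvVisitB graph lvl acc.1 x, acc.2 ++ [x])
    dsimp only at ih'
    omega

-- A's while-loop over the deque of (node, level) pairs; returns (visited, order, levels)
def pvBfsA (graph : List (String × List String)) (q : List (String × Int))
    (visited : List String) (order : List String) (levels : PySem.Dict String Int) :
    List String × List String × PySem.Dict String Int :=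
  match q with
  | [] => (visited, order, levels)
  | (node, lvl) :: rest =>
    let r := (pvLookup graph node).foldl (pvStepA lvl) (visited, levels, rest)
    pvBfsA graph r.2.2 r.1 (order ++ [node]) r.2.1
termination_by 2 * pvUnvis graph visited + q.length
decreasing_by exact pvBfsA_dec graph node lvl rest visited levels

-- A's bfs_from_root
def pvRootA (graph : List (String × List String)) (root : String)
    (s : List String × List String × PySem.Dict String Int) :
    List String × List String × PySem.Dict String Int :=
  pvBfsA graph [(root, 0)] (PySem.Set.add s.1 root) s.2.1 (s.2.2.insert root 0)

def full_bfs (graph : List (String × List String)) (start : String) :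
    List String × (List (String × Int)) :=
  let allNodes := PySem.List.sorted (graph.map Prod.fst) (fun x => x) false
  let s0 : List String × List String × PySem.Dict String Int := ([], [], PySem.Dict.empty)
  let s1 := if allNodes.contains start then pvRootA graph start s0 else s0
  let s2 := allNodes.foldl (fun s node => if s.1.contains node then s else pvRootA graph node s) s1
  (s2.2.1, s2.2.2.items)

-- ===== PORT B =====
-- B's while-loop over level-synchronous frontiers; returns (visited, order, levels)
def pvBfsB (graph : List (String × List String)) (frontier : List String) (lvl : Int)
    (visited : List String) (order : List String) (levels : PySem.Dict String Int) :
    List String × List String × PySem.Dict String Int :=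
  match frontier with
  | [] => (visited, order, levels)
  | _ :: _ =>
    let r := frontier.foldl (fun acc node => (pvVisitB graph lvl acc.1 node, acc.2 ++ [node]))
      ((visited, levels, ([] : List String)), order)
    pvBfsB graph r.1.2.2 (lvl + 1) r.1.1 r.2 r.1.2.1
termination_by 2 * pvUnvis graph visited + frontier.length
decreasing_by
  simp only [List.length_cons]
  rw [List.foldl_attach (l := frontier)
        (f := fun acc node => (pvVisitB graph lvl acc.1 node, acc.2 ++ [node]))]
  have h := pvBfsB_fold_bound graph lvl frontier ((visited, levels, ([] : List String)), order)
  simp only [List.length_nil] at h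
  omega

-- B's bfs_from_root
def pvRootB (graph : List (String × List String)) (root : String)
    (s : List String × List String × PySem.Dict String Int) :
    List String × List String × PySem.Dict String Int :=
  pvBfsB graph [root] 0 (PySem.Set.add s.1 root) s.2.1 (s.2.2.insert root 0)

def full_bfs_alt (graph : List (String × List String)) (start : String) :
    List String × (List (String × Int)) :=
  let allNodes := PySem.List.sorted (graph.map Prod.fst) (fun x => x) false
  let s0 : List String × List String × PySem.Dict String Int := ([], [], PySem.Dict.empty)
  let s1 := if allNodes.contains start then pvRootB graph start s0 else s0
  let s2 := allNodes.foldl (fun s node => if s.1.contains node then s else pvRootB graph node s) s1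
  (s2.2.1, s2.2.2.items)

-- ===== PRECONDITION & SPEC =====
def Spec_full_bfs (graph : List (String × List String)) (start : String) (out : List String × (List (String × Int))) : Prop := out = full_bfs_alt graph start
instance (graph : List (String × List String)) (start : String) (out : List String × (List (String × Int))) : Decidable (Spec_full_bfs graph start out) := by unfold Spec_full_bfs; infer_instance

-- ===== CLAIM (what is proved, stated in full; the proofs are below) =====
def Claim_equal_full_bfs : Prop := ∀ (graph : List (String × List String)) (start : String), Dom_full_bfs graph start → Spec_full_bfs graph start (full_bfs graph start)

-- ===== LEMMAS AND PROOFS =====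
lemma pvMain (graph : List (String × List String)) :
    ∀ (n : Nat) (cur nxt : List String) (lvl : Int) (v o : List String) (lv : PySem.Dict String Int),
    2 * pvUnvis graph v + 2 * (cur.length + nxt.length) + (if cur = [] then 1 else 0) ≤ n →
    pvBfsA graph (cur.map (fun c => (c, lvl)) ++ nxt.map (fun c => (c, lvl + 1))) v o lv
    = (let r := cur.foldl (fun acc node => (pvVisitB graph lvl acc.1 node, acc.2 ++ [node])) ((v, lv, nxt), o)
       pvBfsB graph r.1.2.2 (lvl + 1) r.1.1 r.2 r.1.2.1) := by
  intro n
  induction n using Nat.strong_induction_on with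
  | _ n ih =>
    intro cur nxt lvl v o lv hm
    cases cur with
    | nil =>
      cases nxt with
      | nil => simp [pvBfsA, pvBfsB]
      | cons x xs =>
        simp only [List.map_nil, List.nil_append, List.foldl_nil]
        rw [if_pos rfl] at hm
        have hlt : 2 * pvUnvis graph v + 2 * ((x :: xs).length + ([] : List String).length)
            + (if (x :: xs) = ([] : List String) then 1 else 0) < n := by
          rw [if_neg (List.cons_ne_nil x xs)]
          simp only [List.length_cons, List.length_nil] at *
          omega
        have ihx := ih _ hlt (x :: xs) [] (lvl + 1) v o lv (le_refl _)
        simp only [List.map_nil, List.append_nil] at ihx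
        rw [ihx]
        conv_rhs => rw [pvBfsB]
    | cons c cs =>
      simp only [List.map_cons, List.cons_append]
      conv_lhs => rw [pvBfsA]
      rw [pvStepA_fold_eq]
      dsimp only
      rw [List.append_assoc, ← List.map_append]
      have hb := pvStepB_fold_bound graph lvl (pvLookup graph c)
        (pv_lookup_subset graph c) v lv []
      set w := (pvLookup graph c).foldl (pvStepB lvl) (v, lv, ([] : List String)) with hw
      rw [if_neg (List.cons_ne_nil c cs)] at hm
      have hlt : 2 * pvUnvis graph w.1 + 2 * (cs.length + (nxt ++ w.2.2).length)
          + (if cs = ([] : List String) then 1 else 0) < n := by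
        have hbonus : (if cs = ([] : List String) then 1 else 0) ≤ 1 := by split <;> omega
        simp only [List.length_append, List.length_cons, List.length_nil] at *
        omega
      have ihx := ih _ hlt cs (nxt ++ w.2.2) lvl w.1 (o ++ [c]) w.2.1 (le_refl _)
      rw [ihx]
      have hv : pvVisitB graph lvl (v, lv, nxt) c = (w.1, w.2.1, nxt ++ w.2.2) := by
        rw [pvVisitB, pvStepB_fold_append]
      conv_rhs => rw [List.foldl_cons]
      rw [hv]

lemma pvRoot_eq (graph : List (String × List String)) (root : String)
    (s : List String × List String × PySem.Dict String Int) :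
    pvRootA graph root s = pvRootB graph root s := by
  unfold pvRootA pvRootB
  have h := pvMain graph
    (2 * pvUnvis graph (PySem.Set.add s.1 root) + 2 * (1 + 0) + 0)
    [root] [] 0 (PySem.Set.add s.1 root) s.2.1 (s.2.2.insert root 0)
    (by simp)
  simp only [List.map_cons, List.map_nil, List.append_nil, List.foldl_cons, List.foldl_nil] at h
  rw [h]
  conv_rhs => rw [pvBfsB]
  simp

-- ===== VERDICT (by name: the statement is the Claim_ definition above) =====
theorem full_bfs_spec : Claim_equal_full_bfs := by
  intro graph start _
  unfold Spec_full_bfs full_bfs full_bfs_alt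
  simp only [pvRoot_eq]
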